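-- pv_equiv track=rewrite | github.com/6210qwe/leetcode_py | leetcode_solutions/by_id/q1312.py | count_artifacts
-- ===== SOURCE A (Python) =====
-- from typing import List, Optional
--
-- def count_artifacts(n: int, artifacts: List[List[int]], dig: List[List[int]]) -> int:
--     """
--     函数式接口 - 统计可以提取的工件
--     """
--     # 将所有已挖掘的单元格存入集合
--     dug = set(tuple(cell) for cell in dig)
--
--     # 计算可以提取的工件数量
--     extractable_count = 0
--
--     for artifact in artifacts:
--         r1, c1, r2, c2 = artifact
--         all_parts_dug = True
--
--         for r in range(r1, r2 + 1):
--             for c in range(c1, c2 + 1):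
--                 if (r, c) not in dug:
--                     all_parts_dug = False
--                     break
--             if not all_parts_dug:
--                 break
--
--         if all_parts_dug:
--             extractable_count += 1
--
--     return extractable_count
-- ===== SOURCE B (Python) =====
-- from typing import List, Optional
--
-- def count_artifacts(n: int, artifacts: List[List[int]], dig: List[List[int]]) -> int:
--     # Inverse index: map each covered cell to the artifact ids covering it,
--     # record each artifact's area, then scan the dug set once.
--     index = {}   # cell -> list of artifact ids whose rectangle covers it
--     area = []    # area[i] = number of cells of artifact i
--     for i, (r1, c1, r2, c2) in enumerate(artifacts):
--         cells = 0
--         for r in range(r1, r2 + 1):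
--             for c in range(c1, c2 + 1):
--                 index.setdefault((r, c), []).append(i)
--                 cells += 1
--         area.append(cells)
--     counter = {}  # artifact id -> number of its cells that are dug
--     for cell in set(map(tuple, dig)):
--         for i in index.get(cell, []):
--             counter[i] = counter.get(i, 0) + 1
--     return sum(1 for i, a in enumerate(area) if counter.get(i, 0) == a)
-- ===== Notes on version B (the rewrite author's own statement) =====
-- stated objective: alternative
-- what changed: Replaces A's per-artifact membership sweep over every rectangle cell with an inverse index built once (cell -> covering artifact ids, plus per-artifact areas) followed by a single scan of the distinct dug cells that increments per-artifact counters; an artifact is extractable iff its counter equals its area.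
import Mathlib
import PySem

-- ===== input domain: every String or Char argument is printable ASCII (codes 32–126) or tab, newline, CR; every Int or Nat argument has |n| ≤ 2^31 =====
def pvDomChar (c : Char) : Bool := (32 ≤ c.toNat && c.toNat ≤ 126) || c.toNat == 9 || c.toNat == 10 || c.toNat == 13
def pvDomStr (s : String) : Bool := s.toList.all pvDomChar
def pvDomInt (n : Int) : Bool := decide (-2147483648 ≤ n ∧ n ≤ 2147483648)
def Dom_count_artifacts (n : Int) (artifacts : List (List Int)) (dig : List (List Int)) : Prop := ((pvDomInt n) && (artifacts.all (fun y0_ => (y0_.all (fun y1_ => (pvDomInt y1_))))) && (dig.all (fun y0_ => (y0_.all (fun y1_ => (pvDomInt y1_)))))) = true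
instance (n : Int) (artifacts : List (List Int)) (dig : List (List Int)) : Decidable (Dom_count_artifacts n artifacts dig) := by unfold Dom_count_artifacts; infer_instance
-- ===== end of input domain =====

-- B replaces A's per-artifact sweep over rectangle cells with an inverse cell->artifact-ids index
-- plus per-artifact areas, then one scan of the distinct dug cells incrementing per-artifact counters.


-- ===== PORT A =====
-- inner 'for c in range(c1, c2+1)' with break
def aInnerLoop (dug : List (List Int)) (r : Int) : List Int → Bool
  | [] => true
  | c :: cs => if PySem.Set.contains dug [r, c] then aInnerLoop dug r cs else false

-- outer 'for r in range(r1, r2+1)' with break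
def aOuterLoop (dug : List (List Int)) (cs : List Int) : List Int → Bool
  | [] => true
  | r :: rs => if aInnerLoop dug r cs then aOuterLoop dug cs rs else false

def count_artifacts (n : Int) (artifacts : List (List Int)) (dig : List (List Int)) : Int :=
  let dug : PySem.Set (List Int) := PySem.Set.ofList dig
  artifacts.foldl (fun acc artifact =>
    match artifact with
    | [r1, c1, r2, c2] =>
        if aOuterLoop dug (PySem.List.pyRange c1 (c2 + 1) 1) (PySem.List.pyRange r1 (r2 + 1) 1)
        then acc + 1 else acc
    | _ => acc) 0

-- ===== PORT B =====
-- one enumerate step: unpack artifact, nested loops filling the index and counting cells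
def bStep (st : PySem.Dict (List Int) (List Int) × List Int) (p : Int × List Int) :
    PySem.Dict (List Int) (List Int) × List Int :=
  match p.2 with
  | [r1, c1, r2, c2] =>
      let inner := (PySem.List.pyRange r1 (r2 + 1) 1).foldl (fun st2 r =>
          (PySem.List.pyRange c1 (c2 + 1) 1).foldl
            (fun (st3 : PySem.Dict (List Int) (List Int) × Int) c =>
              (st3.1.modify [r, c] [] (· ++ [p.1]), st3.2 + 1)) st2) (st.1, (0 : Int))
      (inner.1, st.2 ++ [inner.2])
  | [] => (st.1, st.2 ++ [(0 : Int)])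
  | [_] => (st.1, st.2 ++ [(0 : Int)])
  | [_, _] => (st.1, st.2 ++ [(0 : Int)])
  | [_, _, _] => (st.1, st.2 ++ [(0 : Int)])
  | _ :: _ :: _ :: _ :: _ :: _ => (st.1, st.2 ++ [(0 : Int)])

def count_artifacts_alt (n : Int) (artifacts : List (List Int)) (dig : List (List Int)) : Int :=
  let ia := (PySem.List.enumerate artifacts 0).foldl bStep (PySem.Dict.empty, [])
  let index := ia.1
  let area := ia.2
  let dugset : PySem.Set (List Int) := PySem.Set.ofList dig
  let counter := dugset.foldl (fun ctr cell =>
      (index.getD cell []).foldl (fun ctr2 i => ctr2.modify i 0 (· + 1)) ctr)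
    (PySem.Dict.empty : PySem.Dict Int Int)
  (PySem.List.enumerate area 0).foldl (fun acc p =>
      if counter.getD p.1 0 = p.2 then acc + 1 else acc) 0

-- ===== PRECONDITION & SPEC =====
-- Pre_ excludes exactly the inputs on which Python A raises: an artifact row that is not
-- a 4-element list makes A's tuple unpacking raise ValueError.
def Pre_count_artifacts (n : Int) (artifacts : List (List Int)) (dig : List (List Int)) : Prop :=
  ∀ a ∈ artifacts, a.length = 4
instance (n : Int) (artifacts : List (List Int)) (dig : List (List Int)) : Decidable (Pre_count_artifacts n artifacts dig) := by unfold Pre_count_artifacts; infer_instance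

def pvWitness_count_artifacts : Int × List (List Int) × List (List Int) :=
  (2, [[0, 0, 0, 0], [0, 1, 1, 1]], [[0, 0], [0, 1], [1, 1]])

def Spec_count_artifacts (n : Int) (artifacts : List (List Int)) (dig : List (List Int)) (out : Int) : Prop := out = count_artifacts_alt n artifacts dig
instance (n : Int) (artifacts : List (List Int)) (dig : List (List Int)) (out : Int) : Decidable (Spec_count_artifacts n artifacts dig out) := by unfold Spec_count_artifacts; infer_instance

-- ===== CLAIM (what is proved, stated in full; the proofs are below) =====
def Claim_equal_count_artifacts : Prop := ∀ (n : Int) (artifacts : List (List Int)) (dig : List (List Int)), Dom_count_artifacts n artifacts dig → Pre_count_artifacts n artifacts dig → Spec_count_artifacts n artifacts dig (count_artifacts n artifacts dig)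

-- ===== LEMMAS AND PROOFS =====

-- the rectangle cells of an artifact, row-major, as in both programs' nested ranges
def rect (r1 c1 r2 c2 : Int) : List (List Int) :=
  (PySem.List.pyRange r1 (r2 + 1) 1).flatMap
    (fun r => (PySem.List.pyRange c1 (c2 + 1) 1).map (fun c => [r, c]))

def rectOf (a : List Int) : List (List Int) :=
  match a with
  | [r1, c1, r2, c2] => rect r1 c1 r2 c2
  | _ => []

-- the (cell, id) pairs emitted by one artifact, and by the whole build loop
def pairsOf (p : Int × List Int) : List (List Int × Int) :=
  (rectOf p.2).map (fun c => (c, p.1))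

def allPairs (artifacts : List (List Int)) : List (List Int × Int) :=
  (PySem.List.enumerate artifacts 0).flatMap pairsOf

-- ---- A-side characterisation ----
lemma aInner_eq (dug : List (List Int)) (r : Int) (cs : List Int) :
    aInnerLoop dug r cs = cs.all (fun c => PySem.Set.contains dug [r, c]) := by
  induction cs with
  | nil => rfl
  | cons c cs ih =>
      simp only [aInnerLoop, List.all_cons, ih]
      cases PySem.Set.contains dug [r, c] <;> simp

lemma aOuter_eq (dug : List (List Int)) (cs rs : List Int) :
    aOuterLoop dug cs rs = rs.all (fun r => cs.all (fun c => PySem.Set.contains dug [r, c])) := by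
  induction rs with
  | nil => rfl
  | cons r rs ih =>
      simp only [aOuterLoop, List.all_cons, ih, aInner_eq]
      cases (cs.all fun c => PySem.Set.contains dug [r, c]) <;> simp

lemma rect_all (r1 c1 r2 c2 : Int) (p : List Int → Bool) :
    (rect r1 c1 r2 c2).all p
      = (PySem.List.pyRange r1 (r2 + 1) 1).all
          (fun r => (PySem.List.pyRange c1 (c2 + 1) 1).all (fun c => p [r, c])) := by
  simp only [rect, List.all_flatMap, List.all_map]
  rfl

-- ---- B-side: the build loop ----
lemma bStep_eq (st : PySem.Dict (List Int) (List Int) × List Int) (p : Int × List Int) :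
    bStep st p = ((pairsOf p).foldl (fun d q => d.modify q.1 [] (· ++ [q.2])) st.1,
                  st.2 ++ [((rectOf p.2).length : Int)]) := by
  obtain ⟨i, a⟩ := p
  rcases a with _ | ⟨r1, _ | ⟨c1, _ | ⟨r2, _ | ⟨c2, _ | ⟨y, rest⟩⟩⟩⟩⟩ <;>
    try (simp [bStep, pairsOf, rectOf]; done)
  have inner1 : ∀ (cs : List Int) (r : Int) (d : PySem.Dict (List Int) (List Int)) (k : Int),
      cs.foldl (fun (st3 : PySem.Dict (List Int) (List Int) × Int) c =>
          (st3.1.modify [r, c] [] (· ++ [i]), st3.2 + 1)) (d, k)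
        = (cs.foldl (fun d c => d.modify [r, c] [] (· ++ [i])) d, k + cs.length) := by
    intro cs
    induction cs with
    | nil => intro r d k; simp
    | cons c cs ih =>
        intro r d k
        simp only [List.foldl_cons, ih, List.length_cons, Prod.mk.injEq]
        refine ⟨trivial, ?_⟩; push_cast; ring
  have outer : ∀ (rs cs : List Int) (d : PySem.Dict (List Int) (List Int)) (k : Int),
      rs.foldl (fun st2 r => cs.foldl (fun (st3 : PySem.Dict (List Int) (List Int) × Int) c =>
          (st3.1.modify [r, c] [] (· ++ [i]), st3.2 + 1)) st2) (d, k)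
        = ((rs.flatMap (fun r => cs.map (fun c => [r, c]))).foldl
             (fun d cell => d.modify cell [] (· ++ [i])) d,
           k + ((rs.flatMap (fun r => cs.map (fun c => [r, c]))).length : Int)) := by
    intro rs cs
    induction rs with
    | nil => intro d k; simp
    | cons r rs ih =>
        intro d k
        rw [List.foldl_cons, inner1 cs r d k, ih]
        simp only [List.flatMap_cons, List.foldl_append, List.foldl_map,
          List.length_append, List.length_map, Prod.mk.injEq]
        refine ⟨trivial, ?_⟩; push_cast; ring
  simp only [bStep, pairsOf, rectOf, rect, outer, List.foldl_map, zero_add]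

lemma build_eq (artifacts : List (List Int)) :
    (PySem.List.enumerate artifacts 0).foldl bStep (PySem.Dict.empty, []) =
      ((allPairs artifacts).foldl (fun d q => d.modify q.1 [] (· ++ [q.2])) PySem.Dict.empty,
       (PySem.List.enumerate artifacts 0).map (fun p => ((rectOf p.2).length : Int))) := by
  suffices h : ∀ (l : List (Int × List Int)) (d : PySem.Dict (List Int) (List Int)) (acc : List Int),
      l.foldl bStep (d, acc)
        = ((l.flatMap pairsOf).foldl (fun d q => d.modify q.1 [] (· ++ [q.2])) d,
           acc ++ l.map (fun p => ((rectOf p.2).length : Int))) by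
    simpa [allPairs] using h (PySem.List.enumerate artifacts 0) PySem.Dict.empty []
  intro l
  induction l with
  | nil => intro d acc; simp
  | cons p l ih =>
      intro d acc
      simp only [List.foldl_cons, bStep_eq, ih, List.flatMap_cons, List.foldl_append,
        List.map_cons, List.append_assoc, List.cons_append, List.nil_append]

-- ---- B-side: the counter loop ----
lemma counter_getD (S : List (List Int)) (idx : PySem.Dict (List Int) (List Int))
    (ctr : PySem.Dict Int Int) (i : Int) :
    (S.foldl (fun ctr2 cell => (idx.getD cell []).foldl (fun c2 j => c2.modify j 0 (· + 1)) ctr2) ctr).getD i 0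
      = ctr.getD i 0 + (S.map (fun cell => (((idx.getD cell []).count i : Nat) : Int))).sum := by
  induction S generalizing ctr with
  | nil => simp
  | cons c S ih =>
      simp only [List.foldl_cons, ih, List.map_cons, List.sum_cons,
        PySem.Dict.getD_foldl_modify_add_one]
      ring

-- ---- counting pairs ----
lemma count_map_snd_filter (P : List (List Int × Int)) (cell : List Int) (i : Int) :
    ((P.filter (fun q => q.1 == cell)).map (·.2)).count i = P.count (cell, i) := by
  induction P with
  | nil => rfl
  | cons q P ih =>
      obtain ⟨qc, qi⟩ := q
      by_cases hc : qc = cell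
      · subst hc
        by_cases hi : qi = i <;>
          simp [ih, hi, Prod.ext_iff]
      · simp [ih, hc, Prod.ext_iff]

lemma count_map_pair (l : List (List Int)) (j i : Int) (cell : List Int) :
    ((l.map (fun c => (c, j))).count (cell, i)) = if j = i then l.count cell else 0 := by
  induction l with
  | nil => simp
  | cons x l ih =>
      simp only [List.map_cons, List.count_cons, ih]
      by_cases hj : j = i
      · subst hj
        by_cases hx : x = cell <;> simp [hx, Prod.ext_iff]
      · simp [hj, Prod.ext_iff]

lemma count_flatMap {α β : Type} [BEq β] (l : List α) (g : α → List β) (b : β) :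
    (l.flatMap g).count b = (l.map (fun x => (g x).count b)).sum := by
  induction l with
  | nil => rfl
  | cons x l ih => simp [List.flatMap_cons, List.count_append, ih]

lemma sum_single {α : Type} (l : List α) (f : α → Int) (g : α → Nat) (p : α)
    (hp : p ∈ l) (hu : (l.map f).Nodup) :
    (l.map (fun q => if f q = f p then g q else 0)).sum = g p := by
  induction l with
  | nil => cases hp
  | cons x l ih =>
      simp only [List.map_cons, List.nodup_cons, List.mem_map] at hu
      rcases List.mem_cons.mp hp with h | h
      · rw [← h] at hu ⊢
        have : (l.map (fun q => if f q = f p then g q else 0)).sum = 0 := by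
          apply List.sum_eq_zero
          intro y hy
          simp only [List.mem_map] at hy
          obtain ⟨q, hq, rfl⟩ := hy
          have : f q ≠ f p := fun he => hu.1 ⟨q, hq, he⟩
          simp [this]
        simp [this]
      · have hne : f x ≠ f p := by
          intro he
          exact hu.1 ⟨p, h, he.symm⟩
        simp [hne, ih h hu.2]

lemma sum_count_cons (S : List (List Int)) (x : List Int) (l : List (List Int)) :
    (S.map (fun c => ((x :: l).count c : Nat))).sum
      = (S.map (fun c => (l.count c : Nat))).sum + S.count x := by
  induction S with
  | nil => simp
  | cons s S ihS =>
      rw [List.map_cons, List.sum_cons, ihS, List.map_cons, List.sum_cons,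
        List.count_cons, List.count_cons]
      by_cases hsx : x = s
      · subst hsx; simp only [beq_self_eq_true, if_true]; omega
      · have h1 : (s == x) = false := by simp [Ne.symm hsx]
        have h2 : (x == s) = false := by simp [hsx]
        rw [h1, h2]; omega

lemma sum_count_eq_countP (S l : List (List Int)) (h : S.Nodup) :
    (S.map (fun c => (l.count c : Nat))).sum = l.countP (fun x => decide (x ∈ S)) := by
  induction l with
  | nil => simp
  | cons x l ih =>
      simp only [List.countP_cons]
      rw [← ih, sum_count_cons]
      by_cases hmem : x ∈ S
      · rw [List.count_eq_one_of_mem h hmem]; simp [hmem]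
      · rw [List.count_eq_zero.mpr hmem]; simp [hmem]

lemma enumerate_enum_map {β : Type} (l : List (List Int)) (f : Int × List Int → β) (s : Int) :
    PySem.List.enumerate ((PySem.List.enumerate l s).map f) s
      = (PySem.List.enumerate l s).map (fun p => (p.1, f p)) := by
  induction l generalizing s with
  | nil => rfl
  | cons x l ih => simp [PySem.List.enumerate_cons, ih]

lemma foldl_enumerate_snd {σ : Type} (l : List (List Int)) (g : σ → List Int → σ) (s : Int) (init : σ) :
    (PySem.List.enumerate l s).foldl (fun acc p => g acc p.2) init = l.foldl g init := by
  induction l generalizing s init with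
  | nil => rfl
  | cons x l ih => simp [PySem.List.enumerate_cons, ih]

lemma sum_intCast (S : List (List Int)) (g : List Int → Nat) :
    (S.map (fun c => ((g c : Nat) : Int))).sum = ((S.map g).sum : Int) := by
  induction S with
  | nil => rfl
  | cons s S ih => simp [ih]

lemma list4 (a : List Int) (h : a.length = 4) : ∃ r1 c1 r2 c2, a = [r1, c1, r2, c2] := by
  rcases a with _ | ⟨r1, _ | ⟨c1, _ | ⟨r2, _ | ⟨c2, _ | ⟨y, rest⟩⟩⟩⟩⟩
  · simp at h
  · simp at h
  · simp at h
  · simp at h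
  · exact ⟨r1, c1, r2, c2, rfl⟩
  · simp [List.length_cons] at h

lemma counter_value (arts dig : List (List Int)) (idx : PySem.Dict (List Int) (List Int))
    (hidx : ∀ cell, idx.getD cell [] = ((allPairs arts).filter (fun q => q.1 == cell)).map (·.2))
    (p : Int × List Int) (hp : p ∈ PySem.List.enumerate arts 0) :
    ((PySem.Set.ofList dig).foldl (fun ctr cell =>
        (idx.getD cell []).foldl (fun c2 j => c2.modify j 0 (· + 1)) ctr)
      (PySem.Dict.empty : PySem.Dict Int Int)).getD p.1 0
      = (((rectOf p.2).countP (fun x => decide (x ∈ PySem.Set.ofList dig)) : Nat) : Int) := by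
  rw [counter_getD]
  have h1 : ∀ cell, ((idx.getD cell []).count p.1) = (rectOf p.2).count cell := by
    intro cell
    rw [hidx, count_map_snd_filter, allPairs, count_flatMap]
    have h2 : ((PySem.List.enumerate arts 0).map (fun q => (pairsOf q).count (cell, p.1)))
        = (PySem.List.enumerate arts 0).map
            (fun q => if q.1 = p.1 then (rectOf q.2).count cell else 0) := by
      simp only [pairsOf, count_map_pair]
    rw [h2]
    exact sum_single _ Prod.fst (fun q => (rectOf q.2).count cell) p hp
      (by rw [PySem.List.map_fst_enumerate]; exact PySem.List.nodup_pyRange_one _ _)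
  simp only [h1, sum_intCast, sum_count_eq_countP _ _ (PySem.Set.nodup_ofList dig)]
  simp

-- ===== VERDICT (by name: the statement is the Claim_ definition above) =====
theorem count_artifacts_spec : Claim_equal_count_artifacts := by
  intro n arts dig _ hpre
  unfold Spec_count_artifacts
  have hidx : ∀ cell,
      ((allPairs arts).foldl (fun d q => d.modify q.1 [] (· ++ [q.2])) PySem.Dict.empty).getD cell []
        = ((allPairs arts).filter (fun q => q.1 == cell)).map (·.2) := by
    intro cell; rw [PySem.Dict.getD_foldl_modify_append]; simp
  have hA : count_artifacts n arts dig
      = arts.foldl (fun acc a =>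
          if (rectOf a).all (fun cell => PySem.Set.contains (PySem.Set.ofList dig) cell)
          then acc + 1 else acc) 0 := by
    simp only [count_artifacts]
    apply PySem.List.foldl_congr_mem'
    intro a ha acc
    obtain ⟨r1, c1, r2, c2, rfl⟩ := list4 a (hpre a ha)
    simp only [rectOf, rect_all, aOuter_eq]
  have hB : count_artifacts_alt n arts dig
      = arts.foldl (fun acc a =>
          if (((rectOf a).countP (fun x => decide (x ∈ PySem.Set.ofList dig)) : Nat) : Int)
              = ((rectOf a).length : Int)
          then acc + 1 else acc) 0 := by
    simp only [count_artifacts_alt, build_eq]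
    rw [enumerate_enum_map, List.foldl_map]
    rw [PySem.List.foldl_congr_mem' _ _ (fun acc (p : Int × List Int) =>
        if (((rectOf p.2).countP (fun x => decide (x ∈ PySem.Set.ofList dig)) : Nat) : Int)
            = ((rectOf p.2).length : Int)
        then acc + 1 else acc) 0 ?_]
    · exact foldl_enumerate_snd arts
        (fun acc a =>
          if (((rectOf a).countP (fun x => decide (x ∈ PySem.Set.ofList dig)) : Nat) : Int)
              = ((rectOf a).length : Int)
          then acc + 1 else acc) 0 (0 : Int)
    · intro p hp acc
      rw [counter_value arts dig _ hidx p hp]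
  rw [hA, hB]
  apply PySem.List.foldl_congr_mem'
  intro a ha acc
  have hiff : ((((rectOf a).countP (fun x => decide (x ∈ PySem.Set.ofList dig)) : Nat) : Int)
        = ((rectOf a).length : Int))
      ↔ ((rectOf a).all (fun cell => PySem.Set.contains (PySem.Set.ofList dig) cell) = true) := by
    rw [Int.natCast_inj]
    simp [List.countP_eq_length, List.all_eq_true]
  exact if_congr hiff.symm rfl rfl
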